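-- pv_equiv track=rewrite | github.com/AlejaArteaga1/ProgrammingCourse | Chapter1_Programing_Basic/Class1-3(8)_Lists/Homework_E_4.py | group_words_by_size
-- ===== SOURCE A (Python) =====
-- def group_words_by_size(list):
--     small = []
--     medium = []
--     bigger = []
--     for word in list:
--         if len(word) >= 1 and len(word) <= 3:
--             small.append(word)
--         elif len(word) >= 4 and len(word) <= 7:
--             medium.append(word)
--         elif len(word) >= 8:
--             bigger.append(word)
--     return [small, medium, bigger]
-- ===== SOURCE B (Python) =====
-- def group_words_by_size(list):
--     small = [w for w in list if 1 <= len(w) <= 3]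
--     medium = [w for w in list if 4 <= len(w) <= 7]
--     bigger = [w for w in list if len(w) >= 8]
--     return [small, medium, bigger]
-- ===== Notes on version B (the rewrite author's own statement) =====
-- stated objective: idiomatic
-- what changed: Replaced the single accumulating loop with an if/elif chain by three independent list comprehensions, one filtering pass per bucket.
import Mathlib
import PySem

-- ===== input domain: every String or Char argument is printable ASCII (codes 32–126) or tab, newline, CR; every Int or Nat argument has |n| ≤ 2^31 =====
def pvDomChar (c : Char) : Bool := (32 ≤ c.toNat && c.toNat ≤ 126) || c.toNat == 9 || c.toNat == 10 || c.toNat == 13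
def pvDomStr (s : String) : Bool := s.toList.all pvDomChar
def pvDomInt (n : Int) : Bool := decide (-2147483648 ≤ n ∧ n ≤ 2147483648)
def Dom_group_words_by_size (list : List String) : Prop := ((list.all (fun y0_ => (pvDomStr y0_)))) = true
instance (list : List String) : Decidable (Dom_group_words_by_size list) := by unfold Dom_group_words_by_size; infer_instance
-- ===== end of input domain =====

-- B replaces A's single accumulating loop by three independent filtering passes (idiomatic).

-- ===== PORT A =====
-- A: one loop threading the three accumulators through an if/elif chain.
def group_words_by_size (list : List String) : List (List String) :=
  let st := list.foldl (fun (st : List String × List String × List String) word =>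
    let (small, medium, bigger) := st
    if PySem.Str.len word ≥ 1 ∧ PySem.Str.len word ≤ 3 then (small ++ [word], medium, bigger)
    else if PySem.Str.len word ≥ 4 ∧ PySem.Str.len word ≤ 7 then (small, medium ++ [word], bigger)
    else if PySem.Str.len word ≥ 8 then (small, medium, bigger ++ [word])
    else (small, medium, bigger)) ([], [], [])
  [st.1, st.2.1, st.2.2]

-- ===== PORT B =====
-- B: three independent filters over the input.
def group_words_by_size_alt (list : List String) : List (List String) :=
  [list.filter (fun w => 1 ≤ PySem.Str.len w ∧ PySem.Str.len w ≤ 3),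
   list.filter (fun w => 4 ≤ PySem.Str.len w ∧ PySem.Str.len w ≤ 7),
   list.filter (fun w => PySem.Str.len w ≥ 8)]

-- ===== PRECONDITION & SPEC =====
def Spec_group_words_by_size (list : List String) (out : List (List String)) : Prop := out = group_words_by_size_alt list
instance (list : List String) (out : List (List String)) : Decidable (Spec_group_words_by_size list out) := by unfold Spec_group_words_by_size; infer_instance

-- ===== CLAIM (what is proved, stated in full; the proofs are below) =====
def Claim_equal_group_words_by_size : Prop := ∀ (list : List String), Dom_group_words_by_size list → Spec_group_words_by_size list (group_words_by_size list)

-- ===== LEMMAS AND PROOFS =====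

-- loop invariant: the fold starting from arbitrary accumulators appends the filters
theorem gwbs_fold_inv (list : List String) (s m b : List String) :
    list.foldl (fun (st : List String × List String × List String) word =>
      let (small, medium, bigger) := st
      if PySem.Str.len word ≥ 1 ∧ PySem.Str.len word ≤ 3 then (small ++ [word], medium, bigger)
      else if PySem.Str.len word ≥ 4 ∧ PySem.Str.len word ≤ 7 then (small, medium ++ [word], bigger)
      else if PySem.Str.len word ≥ 8 then (small, medium, bigger ++ [word])
      else (small, medium, bigger)) (s, m, b)
    = (s ++ list.filter (fun w => decide (1 ≤ PySem.Str.len w ∧ PySem.Str.len w ≤ 3)),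
       m ++ list.filter (fun w => decide (4 ≤ PySem.Str.len w ∧ PySem.Str.len w ≤ 7)),
       b ++ list.filter (fun w => decide (PySem.Str.len w ≥ 8))) := by
  induction list generalizing s m b with
  | nil => simp
  | cons w t ih =>
    simp only [List.foldl_cons, List.filter_cons]
    by_cases h1 : PySem.Str.len w ≥ 1 ∧ PySem.Str.len w ≤ 3
    · have h2 : ¬ (PySem.Str.len w ≥ 4 ∧ PySem.Str.len w ≤ 7) := by omega
      have h3 : ¬ (PySem.Str.len w ≥ 8) := by omega
      rw [if_pos h1, ih]
      simp at h1 h2 h3 ⊢; omega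
    · by_cases h2 : PySem.Str.len w ≥ 4 ∧ PySem.Str.len w ≤ 7
      · have h3 : ¬ (PySem.Str.len w ≥ 8) := by omega
        rw [if_neg h1, if_pos h2, ih]
        simp at h1 h2 h3 ⊢; omega
      · by_cases h3 : PySem.Str.len w ≥ 8
        · rw [if_neg h1, if_neg h2, if_pos h3, ih]
          simp at h1 h2 h3 ⊢; omega
        · rw [if_neg h1, if_neg h2, if_neg h3, ih]
          simp at h1 h2 h3 ⊢; omega

-- ===== VERDICT (by name: the statement is the Claim_ definition above) =====
theorem group_words_by_size_spec : Claim_equal_group_words_by_size := by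
  intro list _
  unfold Spec_group_words_by_size group_words_by_size group_words_by_size_alt
  simp only [gwbs_fold_inv, List.nil_append]
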